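-- pv_equiv track=rewrite | github.com/wwwwodddd/Zukunft | leetcode/widest-pair-of-indices-with-equal-range-sum.py | widestPairOfIndices
-- ===== SOURCE A (Python) =====
-- from typing import List
--
-- def widestPairOfIndices(a: List[int], b: List[int]) -> int:
--     s = 0
--     g = {}
--     g[0] = -1
--     z = 0
--     for i in range(len(a)):
--         s += a[i] - b[i]
--         if s in g:
--             z = max(z, i - g[s])
--         else:
--             g[s] = i
--     return z
-- ===== SOURCE B (Python) =====
-- from typing import List
--
-- def widestPairOfIndices(a: List[int], b: List[int]) -> int:
--     # Build the prefix-difference array P (P[0] = 0).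
--     P = [0]
--     for x, y in zip(a, b):
--         P.append(P[-1] + x - y)
--     # Sort the (index, value) pairs by value; the stable sort keeps equal
--     # values as a contiguous run whose first element carries the smallest
--     # index.  The answer is the widest run, i.e. the largest distance from
--     # a run's first index to any later index in the same run.
--     pairs = sorted(enumerate(P), key=lambda jv: jv[1])
--     z = 0
--     pj, pv = pairs[0]
--     for j, v in pairs[1:]:
--         if v == pv:
--             if j - pj > z:
--                 z = j - pj
--         else:
--             pj, pv = j, v
--     return z
-- ===== Notes on version B (the rewrite author's own statement) =====
-- stated objective: alternative
-- what changed: Replaces A's single-pass hash-map of first-seen prefix sums with a sort-based algorithm: materialize the prefix-difference array, stably sort its (index, value) pairs by value, and scan the sorted runs of equal values, measuring each index's distance to its run's first (smallest) index.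
import Mathlib
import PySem

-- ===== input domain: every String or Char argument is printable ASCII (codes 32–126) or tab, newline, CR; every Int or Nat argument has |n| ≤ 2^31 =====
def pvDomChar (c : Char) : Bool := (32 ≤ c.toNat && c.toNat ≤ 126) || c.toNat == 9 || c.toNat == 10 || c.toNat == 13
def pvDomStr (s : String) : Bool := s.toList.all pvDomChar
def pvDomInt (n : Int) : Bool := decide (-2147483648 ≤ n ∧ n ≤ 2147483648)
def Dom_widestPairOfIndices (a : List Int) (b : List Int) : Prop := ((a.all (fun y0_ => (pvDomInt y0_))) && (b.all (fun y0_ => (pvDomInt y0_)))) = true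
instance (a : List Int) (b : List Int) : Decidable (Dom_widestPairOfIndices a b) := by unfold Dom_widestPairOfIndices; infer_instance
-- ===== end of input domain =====

-- B replaces A's single-pass first-occurrence hash map with a different algorithm:
-- sort the (index, value) pairs of the prefix-difference array by value and scan the
-- runs of equal values; return values agree, no speed claim.

-- ===== PORT A =====
-- literal port of A: one loop over range(len(a)) carrying (s, g, z)
def widestPairOfIndices (a : List Int) (b : List Int) : Int :=
  ((PySem.List.pyRange 0 (a.length : Int) 1).foldl
    (fun (st : Int × PySem.Dict Int Int × Int) i =>
      let s := st.1 + (PySem.List.pyGetD a i 0 - PySem.List.pyGetD b i 0)  -- a[i], b[i]: in range under Pre_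
      match st.2.1.get? s with
      | some gv => (s, st.2.1, max st.2.2 (i - gv))
      | none => (s, st.2.1.insert s i, st.2.2))
    (0, PySem.Dict.empty.insert 0 (-1), 0)).2.2

-- ===== PORT B =====
-- literal port of B (Source B): build P appending P[-1]+x-y, sort enumerate(P) by value,
-- then scan the sorted runs with state (z, pj, pv); pairs is never empty, so the []
-- branch (Python's pairs[0] on an empty list) is unreachable and 0 is a mere totalizer.
def widestPairOfIndices_alt (a : List Int) (b : List Int) : Int :=
  let P := (a.zip b).foldl
    (fun (P : List Int) p => P ++ [PySem.List.pyGetD P (-1) 0 + p.1 - p.2]) [0]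
  let pairs := PySem.List.sorted (PySem.List.enumerate P 0) (fun jv => jv.2) false
  match pairs with
  | [] => 0
  | p0 :: rest =>
    (rest.foldl
      (fun (st : Int × Int × Int) jv =>
        if jv.2 == st.2.2 then
          (if jv.1 - st.2.1 > st.1 then jv.1 - st.2.1 else st.1, st.2.1, st.2.2)
        else (st.1, jv.1, jv.2))
      (0, p0.1, p0.2)).1

-- ===== PRECONDITION & SPEC =====
-- Pre_ excludes exactly the inputs where A raises IndexError (b shorter than a); A returns on all others.
def Pre_widestPairOfIndices (a : List Int) (b : List Int) : Prop := a.length ≤ b.length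
instance (a : List Int) (b : List Int) : Decidable (Pre_widestPairOfIndices a b) := by
  unfold Pre_widestPairOfIndices; infer_instance
def pvWitness_widestPairOfIndices : List Int × List Int := ([1, 2, 1], [2, 1, 1])

def Spec_widestPairOfIndices (a : List Int) (b : List Int) (out : Int) : Prop :=
  out = widestPairOfIndices_alt a b
instance (a : List Int) (b : List Int) (out : Int) : Decidable (Spec_widestPairOfIndices a b out) := by
  unfold Spec_widestPairOfIndices; infer_instance

-- ===== CLAIM (what is proved, stated in full; the proofs are below) =====
def Claim_equal_widestPairOfIndices : Prop := ∀ (a : List Int) (b : List Int), Dom_widestPairOfIndices a b → Pre_widestPairOfIndices a b → Spec_widestPairOfIndices a b (widestPairOfIndices a b)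

-- ===== LEMMAS AND PROOFS =====

-- helper definitions used only by the proofs
def pvScan (s : Int) : List Int → List Int
  | [] => []
  | x :: xs => (s + x) :: pvScan (s + x) xs

def pvFIdx : List Int → Int → Int
  | [], _ => 0
  | x :: xs, v => if x = v then 0 else pvFIdx xs v + 1

def pvDiffs (a b : List Int) : List Int := (a.zip b).map (fun p => p.1 - p.2)

def pvStepA (st : Int × PySem.Dict Int Int × Int) (jv : Int × Int) :
    Int × PySem.Dict Int Int × Int :=
  let s := st.1 + jv.2
  match st.2.1.get? s with
  | some gv => (s, st.2.1, max st.2.2 (jv.1 - gv))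
  | none => (s, st.2.1.insert s jv.1, st.2.2)

-- first stored index in a list of (index, value) pairs whose value is v
def pvFstJ : List (Int × Int) → Int → Int
  | [], _ => 0
  | p :: t, v => if p.2 = v then p.1 else pvFstJ t v

-- value-then-index lexicographic strict order on (index, value) pairs
def pvLt2 (p q : Int × Int) : Prop := p.2 < q.2 ∨ (p.2 = q.2 ∧ p.1 < q.1)

theorem pvFIdx_append_of_mem {v : Int} : ∀ {xs : List Int} (ys : List Int), v ∈ xs →
    pvFIdx (xs ++ ys) v = pvFIdx xs v := by
  intro xs
  induction xs with
  | nil => intro ys h; simp at h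
  | cons x xs ih =>
    intro ys h
    by_cases hx : x = v
    · simp [pvFIdx, hx]
    · have hv : v ∈ xs := by
        rcases List.mem_cons.mp h with h' | h'
        · exact absurd h'.symm hx
        · exact h'
      simp [pvFIdx, hx, ih ys hv]

theorem pvFIdx_append_of_not_mem {v : Int} : ∀ {xs : List Int} (ys : List Int), v ∉ xs →
    pvFIdx (xs ++ ys) v = (xs.length : Int) + pvFIdx ys v := by
  intro xs
  induction xs with
  | nil => intro ys _; simp
  | cons x xs ih =>
    intro ys h
    have hx : x ≠ v := fun hxv => h (by simp [hxv])
    have hv : v ∉ xs := fun hv => h (List.mem_cons_of_mem _ hv)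
    simp only [List.cons_append, pvFIdx, if_neg hx, ih ys hv, List.length_cons]
    push_cast
    ring

-- pvFIdx is the first occurrence: a witness index with minimality
theorem pvFIdx_spec {v : Int} : ∀ {P : List Int}, v ∈ P →
    ∃ (k : Nat), ∃ (hk : k < P.length), P[k] = v ∧ (k : Int) = pvFIdx P v ∧
      ∀ (m : Nat) (hm : m < P.length), (m : Int) < (k : Int) → P[m] ≠ v := by
  intro P
  induction P with
  | nil => intro h; simp at h
  | cons x xs ih =>
    intro h
    by_cases hx : x = v
    · exact ⟨0, by simp, hx, by simp [pvFIdx, hx], by intro m hm hlt; omega⟩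
    · have hv : v ∈ xs := by
        rcases List.mem_cons.mp h with h' | h'
        · exact absurd h'.symm hx
        · exact h'
      obtain ⟨k, hk, hget, hidx, hmin⟩ := ih hv
      refine ⟨k + 1, by simpa using Nat.succ_lt_succ hk, by simpa using hget, ?_, ?_⟩
      · simp only [pvFIdx, if_neg hx, ← hidx]
        push_cast
        ring
      · intro m hm hlt
        cases m with
        | zero => simpa using hx
        | succ m =>
          have hm' : m < xs.length := by simpa using Nat.lt_of_succ_lt_succ hm
          have : (m : Int) < (k : Int) := by push_cast at hlt ⊢; omega
          simpa using hmin m hm' this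

-- B's pass 0: the append loop materializes pvScan of the pairwise differences
theorem pvBuildP : ∀ (q : List (Int × Int)) (P0 : List Int) (s0 : Int),
    q.foldl (fun (P : List Int) p => P ++ [PySem.List.pyGetD P (-1) 0 + p.1 - p.2]) (P0 ++ [s0])
    = (P0 ++ [s0]) ++ pvScan s0 (q.map (fun p => p.1 - p.2)) := by
  intro q
  induction q with
  | nil => intro P0 s0; simp [pvScan]
  | cons p q ih =>
    intro P0 s0
    have hlast : PySem.List.pyGetD (P0 ++ [s0]) (-1) 0 = s0 := by
      simp [PySem.List.pyGetD, PySem.List.pyGet?, PySem.List.pyIdx?]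
    simp only [List.foldl_cons, hlast]
    have h1 : (P0 ++ [s0]) ++ [s0 + p.1 - p.2] = (P0 ++ [s0]) ++ [s0 + (p.1 - p.2)] := by
      ring_nf
    rw [h1, ih (P0 ++ [s0]) (s0 + (p.1 - p.2))]
    simp [pvScan, List.append_assoc]

-- A's fused loop, run from an arbitrary prefix state, computes the common max fold
theorem pvMainA (P : List Int) : ∀ (l2 : List Int) (pre : List Int) (s z : Int)
    (g : PySem.Dict Int Int),
    P = pre ++ pvScan s l2 →
    (∀ v, g.get? v = if v ∈ pre then some (pvFIdx pre v - 1) else none) →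
    0 ≤ z →
    ((PySem.List.enumerate l2 ((pre.length : Int) - 1)).foldl pvStepA (s, g, z)).2.2
    = (PySem.List.enumerate (pvScan s l2) (pre.length : Int)).foldl
        (fun z jv => max z (jv.1 - pvFIdx P jv.2)) z := by
  intro l2
  induction l2 with
  | nil => intro pre s z g _ _ _; simp [pvScan, PySem.List.enumerate_nil]
  | cons x l2 ih =>
    intro pre s z g hP hg hz
    simp only [pvScan] at hP ⊢
    rw [PySem.List.enumerate_cons, PySem.List.enumerate_cons]
    simp only [List.foldl_cons]
    have hP' : P = (pre ++ [s + x]) ++ pvScan (s + x) l2 := by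
      rw [hP, List.append_assoc]; rfl
    have hidx : ((pre.length : Int) - 1) + 1 = (((pre ++ [s + x]).length : Int)) - 1 := by
      simp
    have hidx2 : (((pre ++ [s + x]).length : Int)) = (pre.length : Int) + 1 := by simp
    by_cases hmem : (s + x) ∈ pre
    · have hstep : pvStepA (s, g, z) ((pre.length : Int) - 1, x)
          = (s + x, g, max z (((pre.length : Int) - 1) - (pvFIdx pre (s + x) - 1))) := by
        simp only [pvStepA, hg (s + x), if_pos hmem]
      have hfP : pvFIdx P (s + x) = pvFIdx pre (s + x) := by
        rw [hP]; exact pvFIdx_append_of_mem _ hmem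
      have hg' : ∀ v, g.get? v
          = if v ∈ pre ++ [s + x] then some (pvFIdx (pre ++ [s + x]) v - 1) else none := by
        intro v
        rw [hg v]
        by_cases hv : v ∈ pre
        · rw [if_pos hv, if_pos (List.mem_append_left _ hv), pvFIdx_append_of_mem _ hv]
        · have hv' : v ∉ pre ++ [s + x] := by
            intro h
            rcases List.mem_append.mp h with h' | h'
            · exact hv h'
            · rw [List.mem_singleton] at h'
              exact hv (h' ▸ hmem)
          rw [if_neg hv, if_neg hv']
      have hz' : 0 ≤ max z (((pre.length : Int) - 1) - (pvFIdx pre (s + x) - 1)) :=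
        le_trans hz (le_max_left _ _)
      rw [hstep, hidx]
      rw [ih (pre ++ [s + x]) (s + x) _ g hP' hg' hz']
      rw [hidx2]
      have hinit : ((pre.length : Int) - 1) - (pvFIdx pre (s + x) - 1)
          = (pre.length : Int) - pvFIdx P (s + x) := by
        rw [hfP]; ring
      simp [hinit]
    · have hstep : pvStepA (s, g, z) ((pre.length : Int) - 1, x)
          = (s + x, g.insert (s + x) ((pre.length : Int) - 1), z) := by
        simp only [pvStepA, hg (s + x), if_neg hmem]
      have hfP : pvFIdx P (s + x) = (pre.length : Int) := by
        rw [hP, pvFIdx_append_of_not_mem _ hmem]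
        simp [pvFIdx]
      have hg' : ∀ v, (g.insert (s + x) ((pre.length : Int) - 1)).get? v
          = if v ∈ pre ++ [s + x] then some (pvFIdx (pre ++ [s + x]) v - 1) else none := by
        intro v
        rw [PySem.Dict.get?_insert]
        by_cases hv : v = s + x
        · subst hv
          rw [if_pos rfl, if_pos (List.mem_append_right _ (List.mem_singleton.mpr rfl))]
          rw [pvFIdx_append_of_not_mem _ hmem]
          simp [pvFIdx]
        · rw [if_neg hv, hg v]
          by_cases hvp : v ∈ pre
          · rw [if_pos hvp, if_pos (List.mem_append_left _ hvp), pvFIdx_append_of_mem _ hvp]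
          · have hv' : v ∉ pre ++ [s + x] := by
              intro h
              rcases List.mem_append.mp h with h' | h'
              · exact hvp h'
              · exact hv (List.mem_singleton.mp h')
            rw [if_neg hvp, if_neg hv']
      rw [hstep, hidx]
      rw [ih (pre ++ [s + x]) (s + x) z (g.insert (s + x) ((pre.length : Int) - 1)) hP' hg' hz]
      rw [hidx2]
      have hinit : max z ((pre.length : Int) - pvFIdx P (s + x)) = z := by
        rw [hfP]
        simp [max_eq_left hz]
      simp [hinit]

-- A's port, under Pre_, equals the fused loop over the enumerated difference list
theorem pvA_eq (a b : List Int) (h : a.length ≤ b.length) :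
    widestPairOfIndices a b
    = ((PySem.List.enumerate (pvDiffs a b) 0).foldl pvStepA
        (0, PySem.Dict.empty.insert 0 (-1), 0)).2.2 := by
  have hlen : (pvDiffs a b).length = a.length := by
    simp [pvDiffs, List.length_zip]
    omega
  rw [PySem.List.enumerate_eq_map_pyRange (pvDiffs a b) 0, List.foldl_map]
  have hlen' : (PySem.List.len (pvDiffs a b)) = (a.length : Int) := by
    simp [hlen]
  rw [hlen']
  unfold widestPairOfIndices
  apply congrArg
  apply congrArg
  apply PySem.List.foldl_congr_mem
  intro st j hj
  have hj' : 0 ≤ j ∧ j < (a.length : Int) := (PySem.List.mem_pyRange_one).mp hj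
  obtain ⟨k, rfl⟩ : ∃ k : Nat, j = (k : Int) := ⟨j.toNat, (Int.toNat_of_nonneg hj'.1).symm⟩
  have hk : k < a.length := by exact_mod_cast hj'.2
  have hkb : k < b.length := lt_of_lt_of_le hk h
  have hkd : k < (pvDiffs a b).length := by rw [hlen]; exact hk
  have hdj : PySem.List.pyGetD (pvDiffs a b) (k : Int) 0
      = PySem.List.pyGetD a (k : Int) 0 - PySem.List.pyGetD b (k : Int) 0 := by
    rw [PySem.List.pyGetD_natCast, PySem.List.pyGetD_natCast, PySem.List.pyGetD_natCast,
        List.getD_eq_getElem _ _ hkd, List.getD_eq_getElem _ _ hk, List.getD_eq_getElem _ _ hkb]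
    simp [pvDiffs]
  simp only [pvStepA, hdj]

-- A, under Pre_, equals the max fold over enumerate(P) with first-occurrence indices
theorem pvA_spec (a b : List Int) (h : a.length ≤ b.length) :
    widestPairOfIndices a b
    = (PySem.List.enumerate (0 :: pvScan 0 (pvDiffs a b)) 0).foldl
        (fun z jv => max z (jv.1 - pvFIdx (0 :: pvScan 0 (pvDiffs a b)) jv.2)) 0 := by
  rw [pvA_eq a b h]
  set l := pvDiffs a b with hl
  set P := (0 : Int) :: pvScan 0 l with hPdef
  rw [PySem.List.enumerate_cons]
  simp only [List.foldl_cons]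
  have h0 : pvFIdx P 0 = 0 := by simp [hPdef, pvFIdx]
  have hmain := pvMainA P l [0] 0 0 (PySem.Dict.empty.insert 0 (-1))
    (by simp [hPdef]) ?_ le_rfl
  · have hidx : ((([0] : List Int).length : Int) - 1) = 0 := by simp
    rw [hidx] at hmain
    rw [hmain]
    simp [h0]
  · intro v
    rw [PySem.Dict.get?_insert]
    by_cases hv : v = 0
    · subst hv
      simp [pvFIdx]
    · rw [if_neg hv, PySem.Dict.get?_empty, if_neg (by simp [hv])]

-- inserting a pair with the largest index keeps the list pvLt2-sorted
theorem pvInsertBy_pairwise : ∀ (acc : List (Int × Int)) (x : Int × Int),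
    acc.Pairwise pvLt2 → (∀ p ∈ acc, p.1 < x.1) →
    (PySem.List.insertBy (fun a b : Int × Int => decide (a.2 < b.2)) x acc).Pairwise pvLt2 := by
  intro acc
  induction acc with
  | nil => intro x _ _; simp [PySem.List.insertBy]
  | cons y ys ih =>
    intro x hpw hfst
    rw [List.pairwise_cons] at hpw
    by_cases hlt : x.2 < y.2
    · rw [PySem.List.insertBy, if_pos (by simpa using hlt)]
      refine List.pairwise_cons.mpr ⟨?_, List.pairwise_cons.mpr ⟨hpw.1, hpw.2⟩⟩
      intro q hq
      rcases List.mem_cons.mp hq with hq | hq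
      · exact Or.inl (hq ▸ hlt)
      · rcases hpw.1 q hq with h' | h'
        · exact Or.inl (lt_trans hlt h')
        · exact Or.inl (h'.1 ▸ hlt)
    · rw [PySem.List.insertBy, if_neg (by simpa using hlt)]
      refine List.pairwise_cons.mpr ⟨?_, ih x hpw.2 (fun p hp => hfst p (List.mem_cons_of_mem _ hp))⟩
      intro q hq
      rcases (PySem.List.mem_insertBy _ _ _ _).mp hq with hq | hq
      · subst hq
        rcases lt_or_eq_of_le (le_of_not_gt hlt) with h' | h'
        · exact Or.inl h'
        · exact Or.inr ⟨h', hfst y List.mem_cons_self⟩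
      · exact hpw.1 q hq

-- the whole insertion sort of a fst-increasing list is pvLt2-sorted
theorem pvFoldlIns_pairwise : ∀ (l acc : List (Int × Int)),
    l.Pairwise (fun p q => p.1 < q.1) → acc.Pairwise pvLt2 →
    (∀ p ∈ acc, ∀ q ∈ l, p.1 < q.1) →
    (l.foldl (fun acc x => PySem.List.insertBy (fun a b : Int × Int => decide (a.2 < b.2)) x acc) acc).Pairwise pvLt2 := by
  intro l
  induction l with
  | nil => intro acc _ hacc _; simpa using hacc
  | cons x l ih =>
    intro acc hl hacc hcross
    rw [List.pairwise_cons] at hl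
    simp only [List.foldl_cons]
    refine ih _ hl.2 (pvInsertBy_pairwise acc x hacc
      (fun p hp => hcross p hp x List.mem_cons_self)) ?_
    intro p hp q hq
    rcases (PySem.List.mem_insertBy _ _ _ _).mp hp with hp | hp
    · exact hp ▸ hl.1 q hq
    · exact hcross p hp q (List.mem_cons_of_mem _ hq)

-- the sorted pair list is pvLt2-sorted (stability: ties keep index order)
theorem pvSorted_pairwise (P : List Int) :
    (PySem.List.sorted (PySem.List.enumerate P 0) (fun jv => jv.2) false).Pairwise pvLt2 := by
  rw [PySem.List.sorted_eq_foldl_insertBy]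
  exact pvFoldlIns_pairwise _ [] (PySem.List.pairwise_lt_enumerate P 0)
    (by simp) (by simp)

-- in a pvLt2-sorted list, pvFstJ is minimal over the indices carrying value v
theorem pvFstJ_le : ∀ {L : List (Int × Int)}, L.Pairwise pvLt2 →
    ∀ {j v : Int}, (j, v) ∈ L → pvFstJ L v ≤ j := by
  intro L
  induction L with
  | nil => intro _ j v h; simp at h
  | cons p t ih =>
    intro hpw j v hmem
    rw [List.pairwise_cons] at hpw
    by_cases hp : p.2 = v
    · rw [pvFstJ, if_pos hp]
      rcases List.mem_cons.mp hmem with h | h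
      · rw [← h]
      · rcases hpw.1 _ h with h' | h'
        · simp at h'; omega
        · exact le_of_lt h'.2
    · rw [pvFstJ, if_neg hp]
      rcases List.mem_cons.mp hmem with h | h
      · exact absurd (congrArg Prod.snd h.symm) hp
      · exact ih hpw.2 h

-- pvFstJ's pair is a member when the value occurs
theorem pvFstJ_mem : ∀ {L : List (Int × Int)} {j v : Int}, (j, v) ∈ L →
    (pvFstJ L v, v) ∈ L := by
  intro L
  induction L with
  | nil => intro j v h; simp at h
  | cons p t ih =>
    intro j v hmem
    by_cases hp : p.2 = v
    · rw [pvFstJ, if_pos hp]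
      have hpv : (p.1, v) = p := by
        obtain ⟨p1, p2⟩ := p
        simpa using hp.symm
      rw [hpv]
      exact List.mem_cons_self
    · rw [pvFstJ, if_neg hp]
      rcases List.mem_cons.mp hmem with h | h
      · exact absurd (congrArg Prod.snd h.symm) hp
      · exact List.mem_cons_of_mem _ (ih h)

-- members of enumerate P are (index, P[index]) pairs with pvFIdx minimal
theorem pvEnum_fidx_le {P : List Int} {j v : Int}
    (h : (j, v) ∈ PySem.List.enumerate P 0) : pvFIdx P v ≤ j ∧ v ∈ P := by
  rcases (PySem.List.mem_enumerate_iff _ _ _).mp h with ⟨k, hk, hjv⟩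
  have hj : j = (k : Int) := by simpa using congrArg Prod.fst hjv
  have hv : P[k] = v := by simpa using (congrArg Prod.snd hjv).symm
  have hvP : v ∈ P := hv ▸ List.getElem_mem hk
  subst hj
  obtain ⟨k0, hk0, hget0, hidx0, hmin0⟩ := pvFIdx_spec hvP
  constructor
  · by_contra hcon
    exact hmin0 k hk (by omega) hv
  · exact hvP

-- the first index of a value in the sorted pair list is its first occurrence in P
theorem pvFstJ_eq_fidx {P : List Int} {j v : Int}
    (hL : (j, v) ∈ PySem.List.sorted (PySem.List.enumerate P 0) (fun jv => jv.2) false) :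
    pvFstJ (PySem.List.sorted (PySem.List.enumerate P 0) (fun jv => jv.2) false) v
      = pvFIdx P v := by
  set L := PySem.List.sorted (PySem.List.enumerate P 0) (fun jv => jv.2) false with hLdef
  have hperm : L.Perm (PySem.List.enumerate P 0) := PySem.List.sorted_perm _ _ _
  have hmemL : (pvFstJ L v, v) ∈ L := pvFstJ_mem hL
  have hmemE : (pvFstJ L v, v) ∈ PySem.List.enumerate P 0 := hperm.mem_iff.mp hmemL
  have h1 : pvFIdx P v ≤ pvFstJ L v := (pvEnum_fidx_le hmemE).1
  have hvP : v ∈ P := (pvEnum_fidx_le hmemE).2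
  obtain ⟨k0, hk0, hget0, hidx0, _⟩ := pvFIdx_spec hvP
  have hmemE0 : ((pvFIdx P v : Int), v) ∈ PySem.List.enumerate P 0 := by
    rw [← hidx0]
    exact (PySem.List.mem_enumerate_iff _ _ _).mpr ⟨k0, hk0, by simp [hget0]⟩
  have h2 : pvFstJ L v ≤ pvFIdx P v := pvFstJ_le (pvSorted_pairwise P) (hperm.mem_iff.mpr hmemE0)
  omega

-- B's run scan over a pvLt2-sorted tail computes the max fold with run-first indices
theorem pvScanRuns : ∀ (rest : List (Int × Int)) (z pj pv : Int), 0 ≤ z →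
    rest.Pairwise pvLt2 → (∀ q ∈ rest, pvLt2 (pj, pv) q) →
    (rest.foldl
      (fun (st : Int × Int × Int) jv =>
        if jv.2 == st.2.2 then
          (if jv.1 - st.2.1 > st.1 then jv.1 - st.2.1 else st.1, st.2.1, st.2.2)
        else (st.1, jv.1, jv.2))
      (z, pj, pv)).1
    = rest.foldl
        (fun z jv => max z (jv.1 - (if jv.2 = pv then pj else pvFstJ rest jv.2))) z := by
  intro rest
  induction rest with
  | nil => intro z pj pv _ _ _; rfl
  | cons q t ih =>
    intro z pj pv hz hpw hhead
    rw [List.pairwise_cons] at hpw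
    simp only [List.foldl_cons]
    by_cases hq : q.2 = pv
    · rw [if_pos (by simpa using hq), if_pos hq]
      have hmax : (if q.1 - pj > z then q.1 - pj else z) = max z (q.1 - pj) := by
        rcases lt_or_ge z (q.1 - pj) with h | h
        · rw [if_pos h, max_eq_right (le_of_lt h)]
        · rw [if_neg (not_lt.mpr h), max_eq_left h]
      rw [hmax]
      rw [ih (max z (q.1 - pj)) pj pv (le_trans hz (le_max_left _ _)) hpw.2
        (fun r hr => ?_)]
      · apply PySem.List.foldl_congr_mem
        intro z' r hr
        by_cases hrv : r.2 = pv
        · rw [if_pos hrv, if_pos hrv]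
        · have hrq : r.2 ≠ q.2 := fun h => hrv (h.trans hq)
          rw [if_neg hrv, if_neg hrv, pvFstJ, if_neg (fun h => hrq h.symm)]
      · rcases hhead r (List.mem_cons_of_mem _ hr) with h | h
        · exact Or.inl h
        · exact Or.inr h
    · rw [if_neg (by simpa using hq), if_neg hq]
      have hpv_lt : pv < q.2 := by
        rcases hhead q List.mem_cons_self with h | h
        · exact h
        · exact absurd h.1.symm hq
      rw [pvFstJ, if_pos rfl]
      have hz0 : max z (q.1 - q.1) = z := by simp [max_eq_left hz]
      rw [hz0]
      rw [ih z q.1 q.2 hz hpw.2 hpw.1]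
      apply PySem.List.foldl_congr_mem
      intro z' r hr
      by_cases hrq : r.2 = q.2
      · rw [if_pos hrq, if_neg (fun h : r.2 = pv => hq (hrq ▸ h ▸ rfl)), pvFstJ, if_pos hrq.symm]
      · have hrpv : r.2 ≠ pv := by
          rcases hpw.1 r hr with h | h
          · intro hcon; rw [hcon] at h; exact absurd (lt_trans hpv_lt h) (lt_irrefl pv)
          · exact absurd h.1.symm hrq
        rw [if_neg hrq, if_neg hrpv, pvFstJ, if_neg (fun h => hrq h.symm)]

-- B equals the same max fold over the sorted pair list
theorem pvB_eq (a b : List Int) :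
    widestPairOfIndices_alt a b
    = (PySem.List.sorted (PySem.List.enumerate (0 :: pvScan 0 (pvDiffs a b)) 0)
        (fun jv => jv.2) false).foldl
        (fun z jv => max z (jv.1 - pvFIdx (0 :: pvScan 0 (pvDiffs a b)) jv.2)) 0 := by
  have hP : (a.zip b).foldl
      (fun (P : List Int) p => P ++ [PySem.List.pyGetD P (-1) 0 + p.1 - p.2]) [0]
      = 0 :: pvScan 0 (pvDiffs a b) := by
    have := pvBuildP (a.zip b) [] 0
    simpa [pvDiffs] using this
  have hdef : widestPairOfIndices_alt a b
      = (match PySem.List.sorted (PySem.List.enumerate ((a.zip b).foldl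
            (fun (P : List Int) p => P ++ [PySem.List.pyGetD P (-1) 0 + p.1 - p.2]) [0]) 0)
            (fun jv => jv.2) false with
        | [] => (0 : Int)
        | p0 :: rest =>
          (rest.foldl
            (fun (st : Int × Int × Int) jv =>
              if jv.2 == st.2.2 then
                (if jv.1 - st.2.1 > st.1 then jv.1 - st.2.1 else st.1, st.2.1, st.2.2)
              else (st.1, jv.1, jv.2))
            (0, p0.1, p0.2)).1) := rfl
  rw [hdef, hP]
  set P := (0 : Int) :: pvScan 0 (pvDiffs a b) with hPdef
  have hpw : (PySem.List.sorted (PySem.List.enumerate P 0) (fun jv => jv.2) false).Pairwise pvLt2 :=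
    pvSorted_pairwise P
  cases hL : PySem.List.sorted (PySem.List.enumerate P 0) (fun jv => jv.2) false with
  | nil =>
    exfalso
    have hE : PySem.List.enumerate P 0 = [] :=
      (PySem.List.sorted_eq_nil_iff (xs := PySem.List.enumerate P 0)
        (key := fun jv => jv.2) (rev := false)).mp hL
    rw [hPdef] at hE
    simp [PySem.List.enumerate_cons] at hE
  | cons p0 rest =>
    rw [hL] at hpw
    rw [List.pairwise_cons] at hpw
    show (rest.foldl
        (fun (st : Int × Int × Int) jv =>
          if jv.2 == st.2.2 then
            (if jv.1 - st.2.1 > st.1 then jv.1 - st.2.1 else st.1, st.2.1, st.2.2)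
          else (st.1, jv.1, jv.2))
        (0, p0.1, p0.2)).1 = _
    have hscan := pvScanRuns rest 0 p0.1 p0.2 le_rfl hpw.2
      (by intro q hq; exact hpw.1 q hq)
    rw [hscan]
    simp only [List.foldl_cons]
    have hp0L : (p0.1, p0.2) ∈ PySem.List.sorted (PySem.List.enumerate P 0) (fun jv => jv.2) false := by
      rw [hL]; exact List.mem_cons_self
    have hfid0 : pvFIdx P p0.2 = p0.1 := by
      have := pvFstJ_eq_fidx (P := P) (j := p0.1) (v := p0.2) hp0L
      rw [hL] at this
      rw [pvFstJ, if_pos rfl] at this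
      omega
    have hhead : max 0 (p0.1 - pvFIdx P p0.2) = 0 := by
      rw [hfid0]; simp
    rw [hhead]
    apply PySem.List.foldl_congr_mem
    intro z jv hjv
    have hjvL : (jv.1, jv.2) ∈ PySem.List.sorted (PySem.List.enumerate P 0) (fun jv => jv.2) false := by
      rw [hL]; exact List.mem_cons_of_mem _ hjv
    by_cases hv : jv.2 = p0.2
    · rw [if_pos hv, hv, hfid0]
    · rw [if_neg hv]
      have := pvFstJ_eq_fidx (P := P) (j := jv.1) (v := jv.2) hjvL
      rw [hL, pvFstJ, if_neg (fun h => hv h.symm)] at this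
      rw [this]

-- the max fold is invariant under permutation (max is right-commutative)
theorem pvFoldMax_perm {L E : List (Int × Int)} (h : L.Perm E) (f : Int → Int) :
    L.foldl (fun z jv => max z (jv.1 - f jv.2)) 0
    = E.foldl (fun z jv => max z (jv.1 - f jv.2)) 0 := by
  letI : RightCommutative (fun (z : Int) (jv : Int × Int) => max z (jv.1 - f jv.2)) :=
    ⟨fun b p q => max_right_comm b (p.1 - f p.2) (q.1 - f q.2)⟩
  exact h.foldl_eq 0

-- ===== VERDICT (by name: the statement is the Claim_ definition above) =====
theorem widestPairOfIndices_spec : Claim_equal_widestPairOfIndices := by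
  intro a b _ hpre
  unfold Spec_widestPairOfIndices
  rw [pvA_spec a b hpre, pvB_eq a b]
  exact (pvFoldMax_perm (PySem.List.sorted_perm _ _ _)
    (pvFIdx (0 :: pvScan 0 (pvDiffs a b)))).symm
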